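-- pv_equiv track=rewrite | github.com/polygon283/yukicoder_level1 | No_104.py | find_road_number
-- ===== SOURCE A (Python) =====
-- def find_road_number(S): #現在の交差点を計算する関数
--     road_number = 1
--
--     for junction in S:
--
--         if junction == "L":
--             road_number = road_number * 2
--         elif junction == "R":
--             road_number = road_number * 2 + 1
--
--     return road_number
-- ===== SOURCE B (Python) =====
-- def find_road_number(S):
--     bits = "1" + "".join("0" if c == "L" else "1" for c in S if c in "LR")
--     return int(bits, 2)
-- ===== Notes on version B (the rewrite author's own statement) =====
-- stated objective: idiomatic
-- what changed: B builds a base-2 numeral string ('1' plus '0'/'1' per L/R, other characters filtered out) and parses it with int(...,2) instead of accumulating the index arithmetically in a loop.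
import Mathlib
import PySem

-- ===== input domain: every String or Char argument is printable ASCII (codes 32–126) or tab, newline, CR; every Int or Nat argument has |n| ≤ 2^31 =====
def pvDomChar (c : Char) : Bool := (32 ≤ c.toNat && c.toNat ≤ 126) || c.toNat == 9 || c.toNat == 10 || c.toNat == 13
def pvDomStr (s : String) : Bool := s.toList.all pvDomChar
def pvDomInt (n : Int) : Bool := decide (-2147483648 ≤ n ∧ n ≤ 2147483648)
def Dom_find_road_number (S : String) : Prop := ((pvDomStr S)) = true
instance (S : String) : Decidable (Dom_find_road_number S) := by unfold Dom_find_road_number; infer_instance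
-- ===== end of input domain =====

-- B builds a base-2 numeral string and parses it, instead of A's arithmetic accumulation (objective: idiomatic).


-- ===== PORT A =====
def find_road_number (S : String) : Int :=
  S.toList.foldl (fun road_number junction =>
    if junction = 'L' then road_number * 2
    else if junction = 'R' then road_number * 2 + 1
    else road_number) 1

-- ===== PORT B =====
-- bits string: '1' followed by '0'/'1' per 'L'/'R' of S (others filtered out)
def frnBits (S : String) : List Char :=
  '1' :: S.toList.filterMap (fun c =>
    if c = 'L' then some '0' else if c = 'R' then some '1' else none)

-- int(bits, 2): base-2 parse of a string of '0'/'1' digits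
def frnParse2 (l : List Char) : Int :=
  l.foldl (fun acc c => acc * 2 + (if c = '1' then 1 else 0)) 0

def find_road_number_alt (S : String) : Int := frnParse2 (frnBits S)

-- ===== PRECONDITION & SPEC =====
def Spec_find_road_number (S : String) (out : Int) : Prop := out = find_road_number_alt S
instance (S : String) (out : Int) : Decidable (Spec_find_road_number S out) := by unfold Spec_find_road_number; infer_instance

-- ===== CLAIM (what is proved, stated in full; the proofs are below) =====
def Claim_equal_find_road_number : Prop := ∀ (S : String), Dom_find_road_number S → Spec_find_road_number S (find_road_number S)

-- ===== LEMMAS AND PROOFS =====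
theorem frn_fold_eq (l : List Char) (r : Int) :
    l.foldl (fun road_number junction =>
      if junction = 'L' then road_number * 2
      else if junction = 'R' then road_number * 2 + 1
      else road_number) r
    = (l.filterMap (fun c =>
        if c = 'L' then some '0' else if c = 'R' then some '1' else none)).foldl
        (fun acc c => acc * 2 + (if c = '1' then 1 else 0)) r := by
  induction l generalizing r with
  | nil => rfl
  | cons c t ih =>
    by_cases hL : c = 'L'
    · simp [hL, List.foldl, List.filterMap_cons, ih]
    · by_cases hR : c = 'R'
      · simp [hL, hR, List.foldl, List.filterMap_cons, ih]
      · simp [hL, hR, List.foldl, List.filterMap_cons, ih]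

-- ===== VERDICT (by name: the statement is the Claim_ definition above) =====
theorem find_road_number_spec : Claim_equal_find_road_number := by
  intro S _
  unfold Spec_find_road_number find_road_number find_road_number_alt frnBits frnParse2
  simp [List.foldl, frn_fold_eq]
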